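-- pv_equiv track=rewrite | github.com/benkoger/overhead-video-worked-examples | functions/mapping_functions.py | get_number_of_frames_in_prev_flights
-- ===== SOURCE A (Python) =====
-- def get_number_of_frames_in_prev_flights(frame_files):
--     """ Create list of number of frames in previous observation flights.
--
--     Args:
--         frame_files: list of all frame_files used in observation
--     """
--
--     all_flight_names = [f.rpartition('/')[0].rpartition('_')[0] for f in frame_files]
--     unique_flight_names = list(set(all_flight_names))
--     unique_flight_names.sort()
--     frames_in_prev_flight = [0]
--     for flight_name in unique_flight_names:
--         frames_in_prev_flight.append(all_flight_names.count(flight_name))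
--
--     return frames_in_prev_flight
-- ===== SOURCE B (Python) =====
-- def get_number_of_frames_in_prev_flights(frame_files):
--     """ Create list of number of frames in previous observation flights.
--
--     Single sort then one linear run-length pass over the sorted names.
--     """
--     names = sorted(f.rpartition('/')[0].rpartition('_')[0] for f in frame_files)
--     result = [0]
--     i, n = 0, len(names)
--     while i < n:
--         j = i + 1
--         while j < n and names[j] == names[i]:
--             j += 1
--         result.append(j - i)
--         i = j
--     return result
-- ===== Notes on version B (the rewrite author's own statement) =====
-- stated objective: alternative
-- what changed: Replaces set() + sort + a per-unique-name full-list .count scan with one sort of all names followed by a single linear run-length pass over the sorted list; asymptotically O(n log n) vs A's O(u*n) scans, though A's C-level .count makes A faster in wall-clock on the measured inputs.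
import Mathlib
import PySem

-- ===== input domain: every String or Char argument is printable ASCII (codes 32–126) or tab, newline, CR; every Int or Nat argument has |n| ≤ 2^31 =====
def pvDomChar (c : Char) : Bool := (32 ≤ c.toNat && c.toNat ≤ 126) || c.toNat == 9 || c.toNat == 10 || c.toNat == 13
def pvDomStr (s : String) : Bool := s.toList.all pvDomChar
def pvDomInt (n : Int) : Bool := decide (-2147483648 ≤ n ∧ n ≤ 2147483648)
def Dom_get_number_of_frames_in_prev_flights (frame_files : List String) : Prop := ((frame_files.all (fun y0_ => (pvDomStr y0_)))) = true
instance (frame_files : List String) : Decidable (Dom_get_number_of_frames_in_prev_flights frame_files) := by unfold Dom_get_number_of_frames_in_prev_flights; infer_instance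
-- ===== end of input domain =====

-- B computes the same value by a different route: one sort of all names, then a single run-length pass (instead of set() + sort + per-unique-name count scans).

-- ===== PORT A =====
-- s.rpartition(c)[0] for a one-character separator: text before the last occurrence of c, '' if absent (exact; via PySem.Chars.rfind).
def pvRpartBefore (s : List Char) (c : Char) : List Char :=
  let i := PySem.Chars.rfind s [c]
  if i < 0 then [] else s.take i.toNat

-- f.rpartition('/')[0].rpartition('_')[0]
def pvFlightName (f : String) : String :=
  String.ofList (pvRpartBefore (pvRpartBefore f.toList '/') '_')

def get_number_of_frames_in_prev_flights (frame_files : List String) : List Int :=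
  let all_flight_names := frame_files.map pvFlightName
  let unique_flight_names := PySem.List.sorted (PySem.Set.ofList all_flight_names) (fun x => x) false
  unique_flight_names.foldl (fun acc flight_name => acc ++ [(PySem.List.count all_flight_names flight_name : Int)]) [0]

-- ===== PORT B =====
-- the outer while loop of Source B: emit the length of each consecutive run of equal names
def pvRunLengths (l : List String) : List Int :=
  match l with
  | [] => []
  | x :: xs =>
      ((1 + (xs.takeWhile (· == x)).length : Nat) : Int) :: pvRunLengths (xs.dropWhile (· == x))
termination_by l.length
decreasing_by
  exact Nat.lt_succ_of_le (List.length_dropWhile_le _ _)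

def get_number_of_frames_in_prev_flights_alt (frame_files : List String) : List Int :=
  let names := PySem.List.sorted (frame_files.map pvFlightName) (fun x => x) false
  0 :: pvRunLengths names

-- ===== PRECONDITION & SPEC =====
def Spec_get_number_of_frames_in_prev_flights (frame_files : List String) (out : List Int) : Prop := out = get_number_of_frames_in_prev_flights_alt frame_files
instance (frame_files : List String) (out : List Int) : Decidable (Spec_get_number_of_frames_in_prev_flights frame_files out) := by unfold Spec_get_number_of_frames_in_prev_flights; infer_instance

-- ===== CLAIM (what is proved, stated in full; the proofs are below) =====
def Claim_equal_get_number_of_frames_in_prev_flights : Prop := ∀ (frame_files : List String), Dom_get_number_of_frames_in_prev_flights frame_files → Spec_get_number_of_frames_in_prev_flights frame_files (get_number_of_frames_in_prev_flights frame_files)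

-- ===== LEMMAS AND PROOFS =====

-- the strictly increasing list of distinct elements of a ≤-sorted list
def pvDedupSorted (l : List String) : List String :=
  match l with
  | [] => []
  | x :: xs => x :: pvDedupSorted (xs.dropWhile (· == x))
termination_by l.length
decreasing_by
  exact Nat.lt_succ_of_le (List.length_dropWhile_le _ _)

lemma pv_foldl_append {α : Type} (f : α → Int) (l : List α) (init : List Int) :
    l.foldl (fun acc n => acc ++ [f n]) init = init ++ l.map f := by
  induction l generalizing init with
  | nil => simp
  | cons a t ih => simp [List.foldl_cons, ih]

lemma pv_dropWhile_gt {x : String} {xs : List String}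
    (h : (x :: xs).Pairwise (· ≤ ·)) :
    ∀ y ∈ xs.dropWhile (· == x), x < y := by
  induction xs with
  | nil => simp
  | cons a rest ih =>
      rcases List.pairwise_cons.1 h with ⟨hx, hrest⟩
      by_cases hax : a = x
      · subst hax
        intro y hy
        simp only [List.dropWhile_cons, beq_self_eq_true, if_true] at hy
        rcases List.pairwise_cons.1 hrest with ⟨ha, hr⟩
        exact ih (List.pairwise_cons.2 ⟨fun y hy => hx y (by simp [hy]), hr⟩) y hy
      · intro y hy
        rw [List.dropWhile_cons, if_neg (by simpa using hax)] at hy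
        have hxa : x < a := lt_of_le_of_ne (hx a (by simp)) (fun e => hax e.symm)
        rcases List.mem_cons.1 hy with rfl | hy'
        · exact hxa
        · rcases List.pairwise_cons.1 hrest with ⟨ha, _⟩
          exact lt_of_lt_of_le hxa (ha y hy')

lemma pv_mem_dedupSorted {l : List String} {y : String} :
    y ∈ pvDedupSorted l → y ∈ l := by
  induction l using pvDedupSorted.induct with
  | case1 => simp [pvDedupSorted]
  | case2 x xs ih =>
      intro hy
      rw [pvDedupSorted] at hy
      rcases List.mem_cons.1 hy with rfl | hy'
      · simp
      · exact List.mem_cons_of_mem _ ((List.dropWhile_sublist _).mem (ih hy'))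

lemma pv_mem_dedupSorted_iff {l : List String} (h : l.Pairwise (· ≤ ·)) {y : String} :
    y ∈ pvDedupSorted l ↔ y ∈ l := by
  constructor
  · exact pv_mem_dedupSorted
  · induction l using pvDedupSorted.induct with
    | case1 => simp
    | case2 x xs ih =>
        intro hy
        rw [pvDedupSorted]
        rcases List.mem_cons.1 hy with rfl | hy'
        · simp
        · by_cases hyx : y = x
          · simp [hyx]
          · refine List.mem_cons_of_mem _ (ih ?_ ?_)
            · exact List.Pairwise.sublist ((List.dropWhile_sublist _).cons x) h
            · -- y ∈ xs, y ≠ x → y ∈ dropWhile (· == x) xs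
              rcases (List.takeWhile_append_dropWhile (p := (· == x)) (l := xs)) ▸ hy' with hmem
              rcases List.mem_append.1 (by rw [List.takeWhile_append_dropWhile] at *; exact hmem : y ∈ xs.takeWhile (· == x) ++ xs.dropWhile (· == x)) with h1 | h2
              · exact absurd (by simpa using List.mem_takeWhile_imp h1) hyx
              · exact h2

lemma pv_pairwise_lt_dedupSorted {l : List String} (h : l.Pairwise (· ≤ ·)) :
    (pvDedupSorted l).Pairwise (· < ·) := by
  induction l using pvDedupSorted.induct with
  | case1 => simp [pvDedupSorted]
  | case2 x xs ih =>
      rw [pvDedupSorted]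
      refine List.pairwise_cons.2 ⟨?_, ih (List.Pairwise.sublist ((List.dropWhile_sublist _).cons x) h)⟩
      intro y hy
      exact pv_dropWhile_gt h y (pv_mem_dedupSorted hy)

lemma pv_map_count_dedupSorted {l : List String} (h : l.Pairwise (· ≤ ·)) :
    (pvDedupSorted l).map (fun n => (l.count n : Int)) = pvRunLengths l := by
  induction l using pvDedupSorted.induct with
  | case1 => simp [pvDedupSorted, pvRunLengths]
  | case2 x xs ih =>
      rw [pvDedupSorted, pvRunLengths, List.map_cons]
      have hsplit := (List.takeWhile_append_dropWhile (p := (· == x)) (l := xs))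
      have hgt := pv_dropWhile_gt h
      have hd_pair : (xs.dropWhile (· == x)).Pairwise (· ≤ ·) :=
        List.Pairwise.sublist ((List.dropWhile_sublist _).cons x) h
      refine List.cons_eq_cons.2 ⟨?_, ?_⟩
      · -- head: count of x in x :: xs is 1 + length of the run
        have hxd : x ∉ xs.dropWhile (· == x) := fun hm => lt_irrefl x (hgt x hm)
        have htake : List.count x (xs.takeWhile (· == x)) = (xs.takeWhile (· == x)).length :=
          List.count_eq_length.2 (fun b hb => (show b = x by simpa using List.mem_takeWhile_imp hb).symm)
        have hxs : List.count x xs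
            = List.count x (xs.takeWhile (· == x)) + List.count x (xs.dropWhile (· == x)) := by
          conv_lhs => rw [← hsplit]
          rw [List.count_append]
        have hfin : List.count x (x :: xs) = 1 + (xs.takeWhile (· == x)).length := by
          rw [List.count_cons_self, hxs, htake, List.count_eq_zero.2 hxd]
          omega
        exact_mod_cast hfin
      · -- tail: for names past the run, counting in x :: xs is counting in the remainder
        rw [← ih hd_pair]
        apply List.map_congr_left
        intro n hn
        have hnx : x < n := hgt n (pv_mem_dedupSorted hn)
        have hne : n ≠ x := ne_of_gt hnx
        have h1 : List.count n (xs.takeWhile (· == x)) = 0 :=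
          List.count_eq_zero.2 (fun hm => hne (by simpa using List.mem_takeWhile_imp hm))
        have hxsn : List.count n xs
            = List.count n (xs.takeWhile (· == x)) + List.count n (xs.dropWhile (· == x)) := by
          conv_lhs => rw [← hsplit]
          rw [List.count_append]
        have hc : List.count n (x :: xs) = List.count n (xs.dropWhile (· == x)) := by
          simp [Ne.symm hne, hxsn, h1]
        simp [hc]

lemma pv_sorted_ofList_eq_dedupSorted (l : List String) :
    PySem.List.sorted (PySem.Set.ofList l) (fun x => x) false
      = pvDedupSorted (PySem.List.sorted l (fun x => x) false) := by
  set s := PySem.List.sorted l (fun x => x) false with hs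
  have hsp : s.Pairwise (· ≤ ·) := PySem.List.sorted_pairwise l (fun x => x)
  apply PySem.List.sorted_eq_of_perm_of_pairwise_lt
  · refine (List.perm_ext_iff_of_nodup ?_ ?_).2 ?_
    · exact (pv_pairwise_lt_dedupSorted hsp).nodup
    · exact PySem.Set.nodup_ofList l
    · intro a
      rw [pv_mem_dedupSorted_iff hsp, PySem.Set.mem_ofList]
      exact (PySem.List.sorted_perm l (fun x => x) false).mem_iff
  · exact pv_pairwise_lt_dedupSorted hsp

lemma pv_main (names : List String) :
    (PySem.List.sorted (PySem.Set.ofList names) (fun x => x) false).foldl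
        (fun acc n => acc ++ [(PySem.List.count names n : Int)]) [0]
      = 0 :: pvRunLengths (PySem.List.sorted names (fun x => x) false) := by
  set s := PySem.List.sorted names (fun x => x) false with hs
  have hcnt : ∀ n, PySem.List.count names n = s.count n := by
    intro n
    show names.count n = s.count n
    exact ((PySem.List.sorted_perm names (fun x => x) false).count_eq n).symm
  rw [pv_foldl_append, pv_sorted_ofList_eq_dedupSorted]
  have : (pvDedupSorted s).map (fun n => (PySem.List.count names n : Int))
      = (pvDedupSorted s).map (fun n => (s.count n : Int)) := by
    apply List.map_congr_left; intro n _; rw [hcnt]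
  rw [this, pv_map_count_dedupSorted (PySem.List.sorted_pairwise names (fun x => x))]
  rfl

-- ===== VERDICT (by name: the statement is the Claim_ definition above) =====
theorem get_number_of_frames_in_prev_flights_spec : Claim_equal_get_number_of_frames_in_prev_flights := by
  intro frame_files _
  show _ = _
  unfold get_number_of_frames_in_prev_flights get_number_of_frames_in_prev_flights_alt
  exact pv_main (frame_files.map pvFlightName)
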